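-- pv_equiv track=rewrite | github.com/abhineetjain13/Crawlwise | backend/app/services/field_value_dom.py | _normalize_image_url_text
-- ===== SOURCE A (Python) =====
-- def _normalize_image_url_text(url: object) -> str:
--     text = str(url or "").strip()
--     for scheme in ("https", "http"):
--         prefix = f"{scheme}:"
--         if text.lower().startswith(prefix):
--             remainder = text[len(prefix) :]
--             if remainder.startswith("/"):
--                 return f"{scheme}://{remainder.lstrip('/')}"
--     return text
-- ===== SOURCE B (Python) =====
-- def _normalize_image_url_text(url: object) -> str:
--     text = str(url or "").strip()
--     n = len(text)
--     i = 0
--     # single left-to-right cursor: consume "http", optional "s", then ":" "/"+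
--     for ch in "http":
--         if i < n and text[i].lower() == ch:
--             i += 1
--         else:
--             return text
--     scheme = "http"
--     if i < n and text[i].lower() == "s":
--         scheme = "https"
--         i += 1
--     if i + 1 < n and text[i] == ":" and text[i + 1] == "/":
--         i += 1
--         while i < n and text[i] == "/":
--             i += 1
--         return scheme + "://" + text[i:]
--     return text
-- ===== Notes on version B (the rewrite author's own statement) =====
-- stated objective: alternative
-- what changed: Replaces A's loop over the two scheme strings with whole-prefix lowercase-startswith tests and slicing by a single left-to-right cursor that consumes the four letters of http, an optional s, then a colon and the run of slashes, never lowercasing or re-scanning the whole string.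
import Mathlib
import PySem

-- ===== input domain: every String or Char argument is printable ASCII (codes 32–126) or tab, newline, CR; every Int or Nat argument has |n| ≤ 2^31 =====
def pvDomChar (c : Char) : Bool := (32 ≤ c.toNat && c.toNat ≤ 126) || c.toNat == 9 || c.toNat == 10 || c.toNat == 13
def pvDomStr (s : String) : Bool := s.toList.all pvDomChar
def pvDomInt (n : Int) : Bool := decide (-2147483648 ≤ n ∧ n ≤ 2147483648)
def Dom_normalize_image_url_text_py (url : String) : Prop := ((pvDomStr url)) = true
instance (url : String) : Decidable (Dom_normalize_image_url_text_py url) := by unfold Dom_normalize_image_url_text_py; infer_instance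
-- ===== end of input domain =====

-- B replaces A's two lowercase-startswith prefix checks by a single left-to-right cursor that
-- consumes "http", an optional "s", then ":" "/"+ (objective: alternative one-pass decomposition).


-- ===== PORT A =====
-- str(url or "").strip(): for a string argument str(url or "") is url itself ('' stays ''), so text = strip url.
-- remainder.lstrip('/') is ported as dropWhile (· == '/') on the code points (exact: a single strip character).
-- The for-loop over ("https", "http") is the structural recursion pvALoop over that list of schemes.
def pvALoop (text : List Char) : List (List Char) → List Char
  | [] => text
  | scheme :: rest =>
      let pre := scheme ++ [':']
      if PySem.Chars.startswith (PySem.Chars.lower text) pre then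
        let remainder := PySem.Chars.slice text (some (pre.length : Int)) none
        if PySem.Chars.startswith remainder ['/'] then
          scheme ++ [':', '/', '/'] ++ remainder.dropWhile (· == '/')
        else pvALoop text rest
      else pvALoop text rest

def normalize_image_url_text_py (url : String) : String :=
  String.ofList (pvALoop (PySem.Chars.strip url.toList) ["https".toList, "http".toList])

-- ===== PORT B =====
-- Source B walks one cursor i over text; consuming the head of a List Char is that cursor advance.
-- pvEatSeq is the `for ch in "http"` loop (each step: bounds check + text[i].lower() == ch);
-- pvFinish is the `i+1 < n and text[i] == ':' and text[i+1] == '/'` check, the slash-skipping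
-- while loop (dropWhile) and the final text[i:] rebuild.
def pvEatSeq : List Char → List Char → Option (List Char)
  | t, [] => some t
  | [], _ :: _ => none
  | x :: r, c :: cs => if PySem.Chars.lowerChar x = c then pvEatSeq r cs else none

def pvFinish (text scheme rest : List Char) : List Char :=
  match rest with
  | c1 :: c2 :: r3 =>
      if c1 = ':' && c2 = '/' then scheme ++ [':', '/', '/'] ++ r3.dropWhile (· == '/') else text
  | _ => text

def pvBCore (text : List Char) : List Char :=
  match pvEatSeq text ['h', 't', 't', 'p'] with
  | none => text
  | some r1 =>
    match r1 with
    | e :: rest =>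
        if PySem.Chars.lowerChar e = 's' then pvFinish text ("https".toList) rest
        else pvFinish text ("http".toList) (e :: rest)
    | [] => text

def normalize_image_url_text_py_alt (url : String) : String :=
  String.ofList (pvBCore (PySem.Chars.strip url.toList))

-- ===== PRECONDITION & SPEC =====
def Spec_normalize_image_url_text_py (url : String) (out : String) : Prop := out = normalize_image_url_text_py_alt url
instance (url : String) (out : String) : Decidable (Spec_normalize_image_url_text_py url out) := by unfold Spec_normalize_image_url_text_py; infer_instance

-- ===== CLAIM (what is proved, stated in full; the proofs are below) =====
def Claim_equal_normalize_image_url_text_py : Prop := ∀ (url : String), Dom_normalize_image_url_text_py url → Spec_normalize_image_url_text_py url (normalize_image_url_text_py url)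

-- ===== LEMMAS AND PROOFS =====

theorem pv_ofNat_toNat (n : Nat) (h : n < 55296) : (Char.ofNat n).toNat = n := by
  unfold Char.ofNat; rw [dif_pos (Or.inl h)]; rfl

theorem pv_lowerChar_colon (c : Char) (h : PySem.Chars.lowerChar c = ':') : c = ':' := by
  unfold PySem.Chars.lowerChar at h
  split_ifs at h with hu
  · exfalso
    simp only [PySem.Chars.isupper, Bool.and_eq_true, decide_eq_true_eq, Char.le_def,
      UInt32.le_iff_toNat_le] at hu
    have h1 : 65 ≤ c.toNat := hu.1
    have h2 : c.toNat ≤ 90 := hu.2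
    have h3 : (Char.ofNat (c.toNat + 32)).toNat = 58 := by rw [h]; rfl
    rw [pv_ofNat_toNat _ (by omega)] at h3
    omega
  · exact h

theorem pv_eatSeq_lower : ∀ (cs t r : List Char), pvEatSeq t cs = some r →
    PySem.Chars.lower t = cs ++ PySem.Chars.lower r := by
  intro cs
  induction cs with
  | nil => intro t r h; simp [pvEatSeq] at h; simp [h]
  | cons c cs ih =>
      intro t r h
      cases t with
      | nil => simp [pvEatSeq] at h
      | cons x xs =>
          simp only [pvEatSeq] at h
          split_ifs at h with hx
          · have h2 := ih xs r h
            simp only [PySem.Chars.lower] at h2 ⊢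
            simp [hx, h2]

theorem pv_core (t : List Char) : pvALoop t ["https".toList, "http".toList] = pvBCore t := by
  by_cases h5 : PySem.Chars.startswith (PySem.Chars.lower t) ("https".toList ++ [':']) = true
  · obtain ⟨m, hm⟩ := (PySem.Chars.startswith_iff _ _).1 h5
    rw [show "https".toList ++ [':'] = ['h','t','t','p','s',':'] from rfl] at hm
    rcases t with _ | ⟨a, _ | ⟨b, _ | ⟨c, _ | ⟨d, _ | ⟨e, _ | ⟨f, r⟩⟩⟩⟩⟩⟩ <;>
      simp [PySem.Chars.lower] at hm
    obtain ⟨ha, hb, hc, hd, he, hf, hmr⟩ := hm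
    have hf' : f = ':' := pv_lowerChar_colon _ hf.symm
    subst hf'
    have h4 : ¬ PySem.Chars.startswith (PySem.Chars.lower (a::b::c::d::e::':'::r)) ("http".toList ++ [':']) = true := by
      simp [PySem.Chars.startswith, PySem.Chars.lower, List.isPrefixOf, ← ha, ← hb, ← hc, ← hd, ← he]
    simp only [pvALoop]
    rw [if_pos h5, if_neg h4]
    have hrem : PySem.Chars.slice (a::b::c::d::e::':'::r) (some (("https".toList ++ [':']).length : Int)) none = r := by
      rw [show (("https".toList ++ [':']).length : Int) = ((6:Nat) : Int) from rfl]
      rw [PySem.Chars.slice_eq_listSlice, PySem.List.slice_from_natCast]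
      rfl
    rw [hrem]
    have hB : pvBCore (a::b::c::d::e::':'::r) = pvFinish (a::b::c::d::e::':'::r) ("https".toList) (':'::r) := by
      simp [pvBCore, pvEatSeq, ← ha, ← hb, ← hc, ← hd, ← he]
    rw [hB]
    by_cases hsl : PySem.Chars.startswith r ['/'] = true
    · rw [if_pos hsl]
      obtain ⟨m2, hm2⟩ := (PySem.Chars.startswith_iff _ _).1 hsl
      rcases r with _ | ⟨g, r'⟩ <;> simp at hm2
      obtain ⟨hg, _⟩ := hm2
      subst hg
      simp [pvFinish, List.dropWhile]
    · rw [if_neg hsl]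
      rcases r with _ | ⟨g, r'⟩
      · simp [pvFinish]
      · have hg : g ≠ '/' := by
          intro e; subst e; exact hsl (by simp [PySem.Chars.startswith, List.isPrefixOf])
        simp [pvFinish, hg]
  · by_cases h4 : PySem.Chars.startswith (PySem.Chars.lower t) ("http".toList ++ [':']) = true
    · obtain ⟨m, hm⟩ := (PySem.Chars.startswith_iff _ _).1 h4
      rw [show "http".toList ++ [':'] = ['h','t','t','p',':'] from rfl] at hm
      rcases t with _ | ⟨a, _ | ⟨b, _ | ⟨c, _ | ⟨d, _ | ⟨e, r⟩⟩⟩⟩⟩ <;>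
        simp [PySem.Chars.lower] at hm
      obtain ⟨ha, hb, hc, hd, he, hmr⟩ := hm
      have he' : e = ':' := pv_lowerChar_colon _ he.symm
      subst he'
      simp only [pvALoop]
      rw [if_neg h5, if_pos h4]
      have hrem : PySem.Chars.slice (a::b::c::d::':'::r) (some (("http".toList ++ [':']).length : Int)) none = r := by
        rw [show (("http".toList ++ [':']).length : Int) = ((5:Nat) : Int) from rfl]
        rw [PySem.Chars.slice_eq_listSlice, PySem.List.slice_from_natCast]
        rfl
      rw [hrem]
      have hcol : PySem.Chars.lowerChar ':' = ':' := by decide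
      have hB : pvBCore (a::b::c::d::':'::r) = pvFinish (a::b::c::d::':'::r) ("http".toList) (':'::r) := by
        simp [pvBCore, pvEatSeq, ← ha, ← hb, ← hc, ← hd, hcol]
      rw [hB]
      by_cases hsl : PySem.Chars.startswith r ['/'] = true
      · rw [if_pos hsl]
        obtain ⟨m2, hm2⟩ := (PySem.Chars.startswith_iff _ _).1 hsl
        rcases r with _ | ⟨g, r'⟩ <;> simp at hm2
        obtain ⟨hg, _⟩ := hm2
        subst hg
        simp [pvFinish, List.dropWhile]
      · rw [if_neg hsl]
        rcases r with _ | ⟨g, r'⟩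
        · simp [pvFinish]
        · have hg : g ≠ '/' := by
            intro e2; subst e2; exact hsl (by simp [PySem.Chars.startswith, List.isPrefixOf])
          simp [pvFinish, hg]
    · simp only [pvALoop]
      rw [if_neg h5, if_neg h4]
      rcases heat : pvEatSeq t ['h','t','t','p'] with _ | r1
      · unfold pvBCore; rw [heat]
      · have hlow : PySem.Chars.lower t = ['h','t','t','p'] ++ PySem.Chars.lower r1 :=
          pv_eatSeq_lower _ _ _ heat
        rcases r1 with _ | ⟨e, rest⟩
        · unfold pvBCore; rw [heat]
        · have hB : pvBCore t = if PySem.Chars.lowerChar e = 's'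
              then pvFinish t ("https".toList) rest else pvFinish t ("http".toList) (e :: rest) := by
            unfold pvBCore; rw [heat]
          rw [hB]
          by_cases hs : PySem.Chars.lowerChar e = 's'
          · rw [if_pos hs]
            rcases rest with _ | ⟨c1, _ | ⟨c2, r3⟩⟩
            · rfl
            · rfl
            · have hcc : (decide (c1 = ':') && decide (c2 = '/')) = false := by
                by_contra hcontra
                rw [Bool.not_eq_false, Bool.and_eq_true, decide_eq_true_eq, decide_eq_true_eq] at hcontra
                obtain ⟨hc1, hc2⟩ := hcontra
                subst hc1; subst hc2
                have hcol : PySem.Chars.lowerChar ':' = ':' := by decide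
                exact h5 ((PySem.Chars.startswith_iff _ _).2
                  ⟨PySem.Chars.lowerChar '/' :: PySem.Chars.lower r3,
                   by rw [hlow]; simp [PySem.Chars.lower, hs, hcol]⟩)
              simp [pvFinish, hcc]
          · rw [if_neg hs]
            rcases rest with _ | ⟨c1, r3⟩
            · rfl
            · have hcc : (decide (e = ':') && decide (c1 = '/')) = false := by
                by_contra hcontra
                rw [Bool.not_eq_false, Bool.and_eq_true, decide_eq_true_eq, decide_eq_true_eq] at hcontra
                obtain ⟨hc1, hc2⟩ := hcontra
                subst hc1; subst hc2
                have hcol : PySem.Chars.lowerChar ':' = ':' := by decide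
                exact h4 ((PySem.Chars.startswith_iff _ _).2
                  ⟨PySem.Chars.lowerChar '/' :: PySem.Chars.lower r3,
                   by rw [hlow]; simp [PySem.Chars.lower, hcol]⟩)
              simp [pvFinish, hcc]

-- ===== VERDICT (by name: the statement is the Claim_ definition above) =====
theorem normalize_image_url_text_py_spec : Claim_equal_normalize_image_url_text_py := by
  intro url _
  unfold Spec_normalize_image_url_text_py normalize_image_url_text_py normalize_image_url_text_py_alt
  rw [pv_core]
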